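-- pv_equiv track=rewrite | github.com/Clovens20/nativify-web | backend/android_builder.py | extract_kotlin_errors
-- ===== SOURCE A (Python) =====
-- from typing import Optional, Tuple, List
--
-- def extract_kotlin_errors(log_content: str) -> List[dict]:
--     """Extrait les erreurs Kotlin du log"""
--     errors = []
--     lines = log_content.split('\n')
--
--     for i, line in enumerate(lines):
--         if 'e: file:///' in line and '.kt:' in line:
--             error_info = {
--                 'file': line.split('file:///')[1].split(':')[0] if 'file:///' in line else '',
--                 'line': '',
--                 'message': ''
--             }
--
--             # Chercher le message d'erreur sur les lignes suivantes
--             for j in range(i+1, min(i+5, len(lines))):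
--                 if lines[j].strip() and not lines[j].startswith('e:'):
--                     error_info['message'] = lines[j].strip()
--                     break
--
--             errors.append(error_info)
--
--     return errors
-- ===== SOURCE B (Python) =====
-- def extract_kotlin_errors(log_content):
--     """Single pass: keep a 'pending' list of errors awaiting a message (with a
--     deadline index) instead of A's per-error nested lookahead."""
--     errors = []
--     pending = []  # (index into errors, deadline = error line index + 4)
--     for j, line in enumerate(log_content.split('\n')):
--         s = line.strip()
--         if s and not line.startswith('e:'):
--             for k, _ in pending:
--                 errors[k]['message'] = s
--             pending = []
--         if 'e: file:///' in line and '.kt:' in line: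
--             errors.append({
--                 'file': line.split('file:///')[1].split(':')[0],
--                 'line': '',
--                 'message': ''
--             })
--             pending.append((len(errors) - 1, j + 4))
--         pending = [(k, dl) for k, dl in pending if dl > j]
--     return errors
-- ===== Notes on version B (the rewrite author's own statement) =====
-- stated objective: alternative
-- what changed: Replaces A's nested per-error lookahead over the next four lines by a single pass that keeps a list of pending errors (with deadline indices) and assigns each qualifying line as the message of every pending error whose window covers it.
import Mathlib
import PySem

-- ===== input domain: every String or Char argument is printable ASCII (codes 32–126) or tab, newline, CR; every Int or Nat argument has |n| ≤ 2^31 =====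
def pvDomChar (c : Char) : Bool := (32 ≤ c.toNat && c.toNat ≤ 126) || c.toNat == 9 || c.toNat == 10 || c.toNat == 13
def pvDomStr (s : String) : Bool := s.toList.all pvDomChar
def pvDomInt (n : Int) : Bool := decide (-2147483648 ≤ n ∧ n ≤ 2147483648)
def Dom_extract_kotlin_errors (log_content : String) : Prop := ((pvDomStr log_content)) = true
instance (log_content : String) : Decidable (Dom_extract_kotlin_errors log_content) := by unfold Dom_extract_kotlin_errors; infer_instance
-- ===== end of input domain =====

-- B replaces A's per-error nested lookahead by a single pass keeping a list of
-- pending errors awaiting a message (objective: alternative decomposition, same cost).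


-- ===== PORT A =====
-- body of A's outer for-loop; the inner lookahead loop with `break` is the find? over
-- the range.  lines[j] is always in range there (i+1 ≤ j < min(i+5, len(lines))), so
-- pyGetD with default "" is exact; split('file:///')[1] is guarded by 'file:///' in line
-- (the split then has ≥ 2 parts) and split(':')[0] always exists, so getD is exact too.
def aBody (lines : List String) (errors : List (List (String × String)))
    (il : Int × String) : List (List (String × String)) :=
  let i := il.1
  let line := il.2
  if PySem.Str.isIn "e: file:///" line && PySem.Str.isIn ".kt:" line then
    let file :=
      if PySem.Str.isIn "file:///" line then
        (((PySem.Str.split? line "file:///").getD []).getD 1 "" |>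
          (fun part => ((PySem.Str.split? part ":").getD []).getD 0 ""))
      else ""
    let msg :=
      match (PySem.List.pyRange (i + 1) (min (i + 5) (lines.length : Int)) 1).find?
          (fun j => !(PySem.Str.strip (PySem.List.pyGetD lines j "") == "") &&
                    !PySem.Str.startswith (PySem.List.pyGetD lines j "") "e:") with
      | some j => PySem.Str.strip (PySem.List.pyGetD lines j "")
      | none => ""
    errors ++ [[("file", file), ("line", ""), ("message", msg)]]
  else errors

def extract_kotlin_errors (log_content : String) : List (List (String × String)) :=
  let lines := (PySem.Str.split? log_content "\n").getD []   -- sep "\n" ≠ "", split? is some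
  (PySem.List.enumerate lines 0).foldl (aBody lines) []

-- ===== PORT B =====
-- errors[k]['message'] = s : the key "message" is present, so Python overwrites it in
-- place; ported as an in-place map over the association list.
def bSetMsg (s : String) (e : List (String × String)) : List (String × String) :=
  e.map (fun kv => if kv.1 == "message" then (kv.1, s) else kv)

-- body of B's single pass; state = (errors, pending); pending entry = (index, deadline)
def bBody (st : List (List (String × String)) × List (Int × Int))
    (jl : Int × String) : List (List (String × String)) × List (Int × Int) :=
  let j := jl.1
  let line := jl.2
  let s := PySem.Str.strip line
  let st :=
    if !(s == "") && !PySem.Str.startswith line "e:" then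
      (st.2.foldl (fun es kd => es.modify kd.1.toNat (bSetMsg s)) st.1, ([] : List (Int × Int)))
    else st
  let st :=
    if PySem.Str.isIn "e: file:///" line && PySem.Str.isIn ".kt:" line then
      (st.1 ++ [[("file",
          ((PySem.Str.split? (((PySem.Str.split? line "file:///").getD []).getD 1 "") ":").getD []).getD 0 ""),
        ("line", ""), ("message", "")]],
       st.2 ++ [((st.1.length : Int), j + 4)])
    else st
  (st.1, st.2.filter (fun kd => j < kd.2))

def extract_kotlin_errors_alt (log_content : String) : List (List (String × String)) :=
  let lines := (PySem.Str.split? log_content "\n").getD []   -- sep "\n" ≠ "", split? is some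
  ((PySem.List.enumerate lines 0).foldl bBody (([], []) : List (List (String × String)) × List (Int × Int))).1

-- ===== PRECONDITION & SPEC =====
def Spec_extract_kotlin_errors (log_content : String) (out : List (List (String × String))) : Prop := out = extract_kotlin_errors_alt log_content
instance (log_content : String) (out : List (List (String × String))) : Decidable (Spec_extract_kotlin_errors log_content out) := by unfold Spec_extract_kotlin_errors; infer_instance

-- ===== CLAIM (what is proved, stated in full; the proofs are below) =====
def Claim_equal_extract_kotlin_errors : Prop := ∀ (log_content : String), Dom_extract_kotlin_errors log_content → Spec_extract_kotlin_errors log_content (extract_kotlin_errors log_content)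

-- ===== LEMMAS AND PROOFS =====

def pvQual (l : String) : Bool :=
  !(PySem.Str.strip l == "") && !PySem.Str.startswith l "e:"

theorem rangeFind (ys : List String) : ∀ (L : List String) (a : Int), 0 ≤ a →
    (∀ k : Nat, (hk : k < ys.length) → PySem.List.pyGetD L (a + k) "" = ys[k]) →
    (match (PySem.List.pyRange a (a + ys.length) 1).find?
        (fun j => pvQual (PySem.List.pyGetD L j "")) with
     | some j => PySem.Str.strip (PySem.List.pyGetD L j "")
     | none => "")
    = (match ys.find? pvQual with | some x => PySem.Str.strip x | none => "") := by
  induction ys with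
  | nil => intro L a h0 _; simp [PySem.List.pyRange_one_eq_nil (le_refl a)]
  | cons y ys ih =>
    intro L a h0 h
    have hy : PySem.List.pyGetD L a "" = y := by
      have := h 0 (by simp)
      simpa using this
    have hlt : a < a + ((y :: ys).length : Int) := by simp
    rw [PySem.List.pyRange_one_cons hlt]
    simp only [List.find?_cons]
    cases hq : pvQual y with
    | true =>
      rw [hy, hq]
      simp [hy]
    | false =>
      rw [hy, hq]
      have harith : a + ((y :: ys).length : Int) = (a + 1) + (ys.length : Int) := by
        simp; ring
      rw [harith]
      have := ih L (a + 1) (by omega) (fun k hk => by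
        have := h (k + 1) (by simpa using Nat.succ_lt_succ hk)
        have e : a + ((k : Int) + 1) = (a + 1) + (k : Int) := by ring
        simpa [e] using this)
      rw [this]
      

def pvIsErr (l : String) : Bool :=
  PySem.Str.isIn "e: file:///" l && PySem.Str.isIn ".kt:" l

def pvFile (l : String) : String :=
  ((PySem.Str.split? (((PySem.Str.split? l "file:///").getD []).getD 1 "") ":").getD []).getD 0 ""

def pvMk (l msg : String) : List (String × String) :=
  [("file", pvFile l), ("line", ""), ("message", msg)]

def pvMsgW (rest : List String) (w : Nat) : String :=
  match (rest.take w).find? pvQual with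
  | some x => PySem.Str.strip x
  | none => ""

def pvSpec : List String → List (List (String × String))
  | [] => []
  | l :: rest => (if pvIsErr l then [pvMk l (pvMsgW rest 4)] else []) ++ pvSpec rest

theorem isIn_file (l : String) (h : PySem.Str.isIn "e: file:///" l = true) :
    PySem.Str.isIn "file:///" l = true := by
  rw [PySem.Str.isIn_iff_infix] at *
  exact List.IsInfix.trans (by decide) h

theorem aFold_eq (suf : List String) : ∀ (pre : List String) (errs : List (List (String × String))),
    (PySem.List.enumerate suf (pre.length : Int)).foldl (aBody (pre ++ suf)) errs
      = errs ++ pvSpec suf := by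
  induction suf with
  | nil => intro pre errs; simp [PySem.List.enumerate, pvSpec]
  | cons l rest ih =>
    intro pre errs
    rw [PySem.List.enumerate_cons, List.foldl_cons]
    have hstep : aBody (pre ++ l :: rest) errs ((pre.length : Int), l)
        = errs ++ (if pvIsErr l then [pvMk l (pvMsgW rest 4)] else []) := by
      cases he : pvIsErr l with
      | false =>
        unfold pvIsErr at he
        simp only [aBody, he, Bool.false_eq_true, if_false]
        simp
      | true =>
        unfold pvIsErr at he
        have h1 : PySem.Str.isIn "e: file:///" l = true := by
          cases h1 : PySem.Str.isIn "e: file:///" l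
          · rw [h1] at he; simp at he
          · rfl
        have hfile := isIn_file l h1
        -- the message: instantiate rangeFind with ys := rest.take 4
        have hlen : ((pre.length : Int) + 1) + ((rest.take 4).length : Int)
            = min ((pre.length : Int) + 5) (((pre ++ l :: rest).length : Int)) := by
          simp [List.length_take]
          omega
        have hmsg := rangeFind (rest.take 4) (pre ++ l :: rest) ((pre.length : Int) + 1)
          (by positivity)
          (fun k hk => by
            have hk4 : k < 4 := lt_of_lt_of_le hk (by simp [List.length_take])
            have hkr : k < rest.length := by
              simp [List.length_take] at hk; omega
            have hidx : ((pre.length : Int) + 1) + (k : Int) = ((pre.length + 1 + k : Nat) : Int) := by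
              push_cast; ring
            rw [hidx, PySem.List.pyGetD_natCast]
            have : (pre ++ l :: rest).getD (pre.length + 1 + k) "" = rest.getD k "" := by
              simp [List.getD, List.getElem?_append_right (by omega : pre.length ≤ pre.length + 1 + k)]
              have : pre.length + 1 + k - pre.length = k + 1 := by omega
              simp [this]
            rw [this]
            simp [List.getD, List.getElem?_eq_getElem hkr, List.getElem_take])
        rw [hlen] at hmsg
        simp only [aBody, he, hfile, if_true]
        -- identify the find? predicate with pvQual and fold in hmsg
        have hpred : (fun j => !(PySem.Str.strip (PySem.List.pyGetD (pre ++ l :: rest) j "") == "") &&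
                    !PySem.Str.startswith (PySem.List.pyGetD (pre ++ l :: rest) j "") "e:")
            = (fun j => pvQual (PySem.List.pyGetD (pre ++ l :: rest) j "")) := by
          funext j; rfl
        rw [hpred, hmsg]
        simp [pvMk, pvFile, pvMsgW]
    rw [hstep]
    have hpre : ((pre.length : Int) + 1) = (((pre ++ [l]).length : Nat) : Int) := by
      simp
    have happ : pre ++ l :: rest = (pre ++ [l]) ++ rest := by simp
    rw [hpre, happ]
    rw [ih (pre ++ [l])]
    cases he : pvIsErr l <;> simp [he, pvSpec]

-- shape invariant of a pending entry
def pvInv (errs : List (List (String × String))) (kd : Int × Int) : Prop :=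
  ∃ k : Nat, kd.1 = (k : Int) ∧
    ∃ f, errs[k]? = some [("file", f), ("line", ""), ("message", "")]

theorem bSetMsg_entry (s f m : String) :
    bSetMsg s [("file", f), ("line", ""), ("message", m)]
      = [("file", f), ("line", ""), ("message", s)] := by
  simp [bSetMsg]

theorem modify_append_left {α : Type} (xs ys : List α) (k : Nat) (h : k < xs.length) (f : α → α) :
    (xs ++ ys).modify k f = xs.modify k f ++ ys := by
  induction xs generalizing k with
  | nil => simp at h
  | cons x xs ih =>
    cases k with
    | zero => simp [List.modify]
    | succ k => simp only [List.cons_append, List.modify_succ_cons]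
                rw [ih k (by simpa using h)]

theorem modify_concat_self {α : Type} (xs : List α) (e : α) (f : α → α) :
    (xs ++ [e]).modify xs.length f = xs ++ [f e] := by
  induction xs with
  | nil => simp [List.modify]
  | cons x xs ih => simpa [List.modify_succ_cons] using ih

theorem modify_eq_self {α : Type} (xs : List α) (k : Nat) (f : α → α) (v : α)
    (h : xs[k]? = some v) (hf : f v = v) : xs.modify k f = xs := by
  apply List.ext_getElem?
  intro j
  rw [List.getElem?_modify]
  by_cases hjk : k = j
  · subst hjk; rw [h]; simp [hf]
  · cases hx : xs[j]? <;> simp [hjk]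

theorem pvMsgW_nil (w : Nat) : pvMsgW [] w = "" := by simp [pvMsgW]

theorem pvMsgW_cons_qual (l : String) (rest : List String) (w : Nat) (hq : pvQual l = true) :
    pvMsgW (l :: rest) (w + 1) = PySem.Str.strip l := by
  simp [pvMsgW, hq]

theorem pvMsgW_cons_notqual (l : String) (rest : List String) (w : Nat) (hq : pvQual l = false) :
    pvMsgW (l :: rest) (w + 1) = pvMsgW rest w := by
  simp [pvMsgW, hq]

-- a fold of modifies below xs.length commutes with ++ ys
theorem fold_modify_append (pending : List (Int × Int)) :
    ∀ (xs ys : List (List (String × String))) (g : Int × Int → List (String × String) → List (String × String)),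
    (∀ kd ∈ pending, kd.1.toNat < xs.length) →
    pending.foldl (fun es kd => es.modify kd.1.toNat (g kd)) (xs ++ ys)
      = pending.foldl (fun es kd => es.modify kd.1.toNat (g kd)) xs ++ ys := by
  induction pending with
  | nil => intro xs ys g _; rfl
  | cons kd pending ih =>
    intro xs ys g h
    simp only [List.foldl_cons]
    rw [modify_append_left xs ys _ (h kd (by simp)) (g kd)]
    exact ih _ ys g (fun kd' hkd' => by
      rw [List.length_modify]; exact h kd' (by simp [hkd']))

theorem length_fold_modify (pending : List (Int × Int))
    (xs : List (List (String × String))) (g : Int × Int → List (String × String) → List (String × String)) :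
    (pending.foldl (fun es kd => es.modify kd.1.toNat (g kd)) xs).length = xs.length := by
  induction pending generalizing xs with
  | nil => rfl
  | cons kd pending ih => simp only [List.foldl_cons]; rw [ih, List.length_modify]

-- filling every pending entry with "" is the identity (messages are still "")
theorem fill_empty (pending : List (Int × Int)) :
    ∀ (errs : List (List (String × String))),
    (∀ kd ∈ pending, pvInv errs kd) →
    pending.foldl (fun es kd => es.modify kd.1.toNat (bSetMsg "")) errs = errs := by
  induction pending with
  | nil => intro errs _; rfl
  | cons kd pending ih =>
    intro errs h
    obtain ⟨k, hk, f, hsh⟩ := h kd (by simp)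
    simp only [List.foldl_cons]
    rw [hk]
    simp only [Int.toNat_natCast]
    rw [modify_eq_self errs k _ _ hsh (bSetMsg_entry "" f "")]
    exact ih errs (fun kd' hkd' => h kd' (by simp [hkd']))

theorem pvMsgW_zero (rest : List String) : pvMsgW rest 0 = "" := by simp [pvMsgW]

-- advancing past a non-message line: the fills relative to t+1 on the filtered
-- pending equal the fills relative to t on the whole pending
theorem fills_step (l : String) (rest : List String) (t : Nat) (hq : pvQual l = false) :
    ∀ (pending : List (Int × Int)) (errs : List (List (String × String))),
    pending.Pairwise (fun p q => p.1 ≠ q.1) →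
    (∀ kd ∈ pending, pvInv errs kd ∧ (t : Int) ≤ kd.2) →
    (pending.filter (fun kd => (t : Int) < kd.2)).foldl
        (fun es kd => es.modify kd.1.toNat (bSetMsg (pvMsgW rest (kd.2 - ((t : Int) + 1)).toNat.succ))) errs
      = pending.foldl
        (fun es kd => es.modify kd.1.toNat (bSetMsg (pvMsgW (l :: rest) (kd.2 - (t : Int)).toNat.succ))) errs := by
  intro pending
  induction pending with
  | nil => intro errs _ _; rfl
  | cons kd pending ih =>
    intro errs hpw hinv
    obtain ⟨⟨k, hk1, f, hsh⟩, htle⟩ := hinv kd (by simp)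
    by_cases hlt : (t : Int) < kd.2
    · rw [List.filter_cons_of_pos (by simpa using hlt)]
      simp only [List.foldl_cons]
      have hw : (kd.2 - (t : Int)).toNat.succ = (kd.2 - ((t : Int) + 1)).toNat.succ + 1 := by
        omega
      rw [hw, pvMsgW_cons_notqual l rest _ hq]
      set errs' := errs.modify kd.1.toNat (bSetMsg (pvMsgW rest (kd.2 - ((t : Int) + 1)).toNat.succ)) with herrs'
      refine ih errs' (hpw.sublist (List.sublist_cons_self kd pending)) ?_
      intro kd' hkd'
      obtain ⟨⟨k', hk1', f', hsh'⟩, htle'⟩ := hinv kd' (by simp [hkd'])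
      refine ⟨⟨k', hk1', f', ?_⟩, htle'⟩
      have hne : kd.1 ≠ kd'.1 := (List.pairwise_cons.mp hpw).1 kd' hkd'
      have hnek : kd.1.toNat ≠ k' := by
        rw [hk1] at hne ⊢
        rw [hk1'] at hne
        simp only [Int.toNat_natCast]
        exact fun h => hne (by exact_mod_cast congrArg (Nat.cast : Nat → Int) h)
      rw [herrs', List.getElem?_modify]
      simp [hsh', if_neg hnek]
    · rw [List.filter_cons_of_neg (by simpa using hlt)]
      simp only [List.foldl_cons]
      have hdl : kd.2 = (t : Int) := le_antisymm (not_lt.mp hlt) htle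
      have hw : (kd.2 - (t : Int)).toNat.succ = 0 + 1 := by omega
      rw [hw, pvMsgW_cons_notqual l rest _ hq, pvMsgW_zero]
      rw [hk1, Int.toNat_natCast, modify_eq_self errs k _ _ hsh (bSetMsg_entry "" f "")]
      exact ih errs (hpw.sublist (List.sublist_cons_self kd pending))
        (fun kd' hkd' => hinv kd' (by simp [hkd']))

theorem modify_concat_len {α : Type} (xs : List α) (e : α) (f : α → α) {n : Nat}
    (h : xs.length = n) : (xs ++ [e]).modify n f = xs ++ [f e] := by
  rw [← h, modify_concat_self]

theorem bFold_eq (suf : List String) : ∀ (t : Nat) (errs : List (List (String × String))) (pending : List (Int × Int)),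
    pending.Pairwise (fun p q => p.1 ≠ q.1) →
    (∀ kd ∈ pending, pvInv errs kd ∧ (t : Int) ≤ kd.2 ∧ kd.2 ≤ (t : Int) + 3) →
    ((PySem.List.enumerate suf (t : Int)).foldl bBody (errs, pending)).1
      = pending.foldl
          (fun es kd => es.modify kd.1.toNat (bSetMsg (pvMsgW suf (kd.2 - (t : Int)).toNat.succ))) errs
        ++ pvSpec suf := by
  induction suf with
  | nil =>
    intro t errs pending hpw hinv
    simp only [PySem.List.enumerate, List.foldl_nil, pvSpec, List.append_nil, pvMsgW_nil]
    rw [fill_empty pending errs (fun kd hkd => (hinv kd hkd).1)]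
  | cons l rest ih =>
    intro t errs pending hpw hinv
    rw [PySem.List.enumerate_cons, List.foldl_cons]
    have hcast : (t : Int) + 1 = ((t + 1 : Nat) : Int) := by push_cast; ring
    cases hq : pvQual l with
    | true =>
      -- the line is a message line: all pending errors get filled, pending clears
      have hbody : bBody (errs, pending) ((t : Int), l)
          = (if pvIsErr l
             then ((pending.foldl (fun es kd => es.modify kd.1.toNat (bSetMsg (PySem.Str.strip l))) errs)
                     ++ [[("file", pvFile l), ("line", ""), ("message", "")]],
                   [(((pending.foldl (fun es kd => es.modify kd.1.toNat (bSetMsg (PySem.Str.strip l))) errs).length : Int), (t : Int) + 4)])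
             else (pending.foldl (fun es kd => es.modify kd.1.toNat (bSetMsg (PySem.Str.strip l))) errs, [])) := by
        unfold pvQual at hq
        cases he : pvIsErr l with
        | true =>
          unfold pvIsErr at he
          simp only [bBody, hq, he, if_true, pvFile]
          simp
        | false =>
          unfold pvIsErr at he
          simp only [bBody, hq, he, Bool.false_eq_true, if_false, if_true]
          simp
      rw [hbody]
      set errs1 := pending.foldl (fun es kd => es.modify kd.1.toNat (bSetMsg (PySem.Str.strip l))) errs with herrs1
      have hRfold : pending.foldl
          (fun es kd => es.modify kd.1.toNat (bSetMsg (pvMsgW (l :: rest) (kd.2 - (t : Int)).toNat.succ))) errs = errs1 := by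
        rw [herrs1]
        exact PySem.List.foldl_congr_mem pending _ _ errs (fun acc kd _ => by
          rw [Nat.succ_eq_add_one, pvMsgW_cons_qual l rest _ hq])
      cases he : pvIsErr l with
      | true =>
        simp only [if_true]
        have hIH := ih (t + 1) (errs1 ++ [[("file", pvFile l), ("line", ""), ("message", "")]])
          [((errs1.length : Int), (t : Int) + 4)]
          (by simp)
          (by
            intro kd hkd
            simp only [List.mem_singleton] at hkd
            subst hkd
            refine ⟨⟨errs1.length, rfl, pvFile l, ?_⟩, by push_cast; omega, by push_cast; omega⟩
            simp)
        rw [hcast, hIH]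
        have hw : (((t : Int) + 4) - ((t + 1 : Nat) : Int)).toNat.succ = 4 := by push_cast; omega
        simp only [List.foldl_cons, List.foldl_nil, Int.toNat_natCast, hw]
        rw [modify_concat_self, bSetMsg_entry]
        rw [hRfold]
        simp [pvSpec, pvMk, he]
      | false =>
        simp only [Bool.false_eq_true, if_false]
        have hIH := ih (t + 1) errs1 [] (by simp) (by simp)
        rw [hcast, hIH, hRfold]
        simp [pvSpec, he]
    | false =>
      -- not a message line: pending survives (filtered), maybe a new error is added
      have hbody : bBody (errs, pending) ((t : Int), l)
          = (if pvIsErr l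
             then (errs ++ [[("file", pvFile l), ("line", ""), ("message", "")]],
                   pending.filter (fun kd => (t : Int) < kd.2) ++ [((errs.length : Int), (t : Int) + 4)])
             else (errs, pending.filter (fun kd => (t : Int) < kd.2))) := by
        unfold pvQual at hq
        cases he : pvIsErr l with
        | true =>
          unfold pvIsErr at he
          simp only [bBody, hq, he, Bool.false_eq_true, if_false, if_true, pvFile]
          simp [List.filter_append]
        | false =>
          unfold pvIsErr at he
          simp only [bBody, hq, he, Bool.false_eq_true, if_false]
      rw [hbody]
      have hkbound : ∀ kd ∈ pending, ∃ k : Nat, kd.1 = (k : Int) ∧ k < errs.length := by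
        intro kd hkd
        obtain ⟨⟨k, hk1, f, hsh⟩, _, _⟩ := hinv kd hkd
        exact ⟨k, hk1, (List.getElem?_eq_some_iff.mp hsh).1⟩
      have hfs := fills_step l rest t hq pending errs hpw
        (fun kd hkd => ⟨(hinv kd hkd).1, (hinv kd hkd).2.1⟩)
      cases he : pvIsErr l with
      | true =>
        simp only [if_true]
        have hIH := ih (t + 1) (errs ++ [[("file", pvFile l), ("line", ""), ("message", "")]])
          (pending.filter (fun kd => (t : Int) < kd.2) ++ [((errs.length : Int), (t : Int) + 4)])
          (by
            rw [List.pairwise_append]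
            refine ⟨hpw.sublist (List.filter_sublist), by simp, ?_⟩
            intro p hp q hq'
            simp only [List.mem_singleton] at hq'
            subst hq'
            obtain ⟨k, hk1, hklt⟩ := hkbound p (List.mem_of_mem_filter hp)
            rw [hk1]
            simp only [ne_eq, Int.natCast_inj]
            omega
          )
          (by
            intro kd hkd
            rcases List.mem_append.mp hkd with hkd | hkd
            · obtain ⟨⟨k, hk1, f, hsh⟩, ht1, ht2⟩ := hinv kd (List.mem_of_mem_filter hkd)
              have hklt : k < errs.length := (List.getElem?_eq_some_iff.mp hsh).1
              have hgt : (t : Int) < kd.2 := by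
                have := List.of_mem_filter hkd
                simpa using this
              refine ⟨⟨k, hk1, f, ?_⟩, by push_cast; omega, by push_cast; omega⟩
              rw [List.getElem?_append_left hklt]
              exact hsh
            · simp only [List.mem_singleton] at hkd
              subst hkd
              refine ⟨⟨errs.length, rfl, pvFile l, by simp⟩, by push_cast; omega, by push_cast; omega⟩)
        rw [hcast, hIH]
        rw [List.foldl_append]
        rw [fold_modify_append _ errs _ _ (fun kd hkd => by
          obtain ⟨k, hk1, hklt⟩ := hkbound kd (List.mem_of_mem_filter hkd)
          rw [hk1]; simpa using hklt)]
        have hw : (((t : Int) + 4) - ((t + 1 : Nat) : Int)).toNat.succ = 4 := by push_cast; omega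
        simp only [List.foldl_cons, List.foldl_nil, Int.toNat_natCast, hw]
        have hlen : (List.foldl (fun es kd => es.modify kd.1.toNat (bSetMsg (pvMsgW rest (kd.2 - ((t + 1 : Nat) : Int)).toNat.succ))) errs (pending.filter (fun kd => (t : Int) < kd.2))).length = errs.length :=
          length_fold_modify _ errs _
        rw [modify_concat_len _ _ _ hlen, bSetMsg_entry]
        rw [← hcast, hfs]
        simp [pvSpec, pvMk, he]
      | false =>
        simp only [Bool.false_eq_true, if_false]
        have hIH := ih (t + 1) errs (pending.filter (fun kd => (t : Int) < kd.2))
          (hpw.sublist (List.filter_sublist))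
          (by
            intro kd hkd
            obtain ⟨hi, ht1, ht2⟩ := hinv kd (List.mem_of_mem_filter hkd)
            have hgt : (t : Int) < kd.2 := by simpa using List.of_mem_filter hkd
            exact ⟨hi, by push_cast; omega, by push_cast; omega⟩)
        rw [hcast, hIH, ← hcast, hfs]
        simp [pvSpec, he]

-- ===== VERDICT (by name: the statement is the Claim_ definition above) =====
theorem extract_kotlin_errors_spec : Claim_equal_extract_kotlin_errors := by
  intro log _
  unfold Spec_extract_kotlin_errors extract_kotlin_errors extract_kotlin_errors_alt
  have hA := aFold_eq ((PySem.Str.split? log "\n").getD []) [] []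
  have hB := bFold_eq ((PySem.Str.split? log "\n").getD []) 0 [] [] (by simp) (by simp)
  simpa using hA.trans hB.symm
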